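-- pv_equiv track=rewrite | github.com/ricagb/Telecomunicaciones---II | Teleco II EC_DM_CM/Codigos de Linea.py | cmi_encode
-- ===== SOURCE A (Python) =====
-- def cmi_encode(bits):
--     signal = []
--     last = -1
--     for bit in bits:
--         if bit == 0:
--             signal.extend([0, 1])
--         else:
--             last *= -1
--             signal.extend([last, 1])
--     return signal
-- ===== SOURCE B (Python) =====
-- def cmi_encode(bits):
--     bits = list(bits)
--     ones = [1 if b != 0 else 0 for b in bits]
--     prefix = []
--     c = 0
--     for o in ones:
--         c += o
--         prefix.append(c)
--     return [v for b, c in zip(bits, prefix)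
--               for v in ([0, 1] if b == 0 else [1 if c % 2 == 1 else -1, 1])]
-- ===== Notes on version B (the rewrite author's own statement) =====
-- stated objective: alternative
-- what changed: Replaces A's hidden toggle state (last flipping in the loop) with a precomputed prefix table of cumulative 1-counts plus a separate stateless mapping pass that derives each pulse's sign from the parity of that count.
import Mathlib
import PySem

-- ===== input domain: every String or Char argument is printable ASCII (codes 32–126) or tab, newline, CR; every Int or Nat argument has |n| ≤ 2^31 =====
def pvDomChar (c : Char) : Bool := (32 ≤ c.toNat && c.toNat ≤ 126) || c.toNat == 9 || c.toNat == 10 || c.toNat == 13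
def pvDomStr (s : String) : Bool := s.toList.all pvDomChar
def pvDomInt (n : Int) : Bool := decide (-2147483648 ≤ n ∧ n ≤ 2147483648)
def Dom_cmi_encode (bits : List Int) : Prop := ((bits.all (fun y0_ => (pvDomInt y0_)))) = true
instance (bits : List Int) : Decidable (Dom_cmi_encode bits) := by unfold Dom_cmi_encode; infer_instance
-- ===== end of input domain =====

-- B replaces A's in-loop toggle with a precomputed prefix-count table and a stateless mapping pass (alternative decomposition, same cost).
-- ===== PORT A =====
def cmi_encode (bits : List Int) : List Int :=
  (bits.foldl (fun (st : List Int × Int) bit =>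
    if bit = 0 then (st.1 ++ [0, 1], st.2)
    else (st.1 ++ [st.2 * -1, 1], st.2 * -1)) ([], -1)).1

-- ===== PORT B =====
def cmi_encode_alt (bits : List Int) : List Int :=
  let ones := bits.map (fun b => if b ≠ 0 then (1 : Int) else 0)
  let prefTab := (ones.foldl (fun (st : List Int × Int) o =>
    (st.1 ++ [st.2 + o], st.2 + o)) ([], 0)).1
  (bits.zip prefTab).flatMap (fun p =>
    if p.1 = 0 then [0, 1] else [if p.2 % 2 = 1 then (1 : Int) else -1, 1])

-- ===== PRECONDITION & SPEC =====
def Spec_cmi_encode (bits : List Int) (out : List Int) : Prop := out = cmi_encode_alt bits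
instance (bits : List Int) (out : List Int) : Decidable (Spec_cmi_encode bits out) := by unfold Spec_cmi_encode; infer_instance

-- ===== CLAIM (what is proved, stated in full; the proofs are below) =====
def Claim_equal_cmi_encode : Prop := ∀ (bits : List Int), Dom_cmi_encode bits → Spec_cmi_encode bits (cmi_encode bits)

-- ===== LEMMAS AND PROOFS =====

-- recursive characterisation of A's loop
def gA : List Int → Int → List Int
  | [], _ => []
  | b :: bs, last => if b = 0 then 0 :: 1 :: gA bs last else (-last) :: 1 :: gA bs (-last)

-- recursive characterisation of B's prefix table
def pref : List Int → Int → List Int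
  | [], _ => []
  | o :: os, c => (c + o) :: pref os (c + o)

theorem foldA_eq (bits : List Int) (acc : List Int) (last : Int) :
    (bits.foldl (fun (st : List Int × Int) bit =>
      if bit = 0 then (st.1 ++ [0, 1], st.2)
      else (st.1 ++ [st.2 * -1, 1], st.2 * -1)) (acc, last)).1 = acc ++ gA bits last := by
  induction bits generalizing acc last with
  | nil => simp [gA]
  | cons b bs ih =>
    by_cases h : b = 0
    · simp only [List.foldl_cons, if_pos h, gA]
      rw [ih]
      simp
    · simp only [List.foldl_cons, if_neg h, gA]
      rw [ih]
      simp [mul_neg_one]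

theorem foldPref_eq (os : List Int) (acc : List Int) (c : Int) :
    (os.foldl (fun (st : List Int × Int) o =>
      (st.1 ++ [st.2 + o], st.2 + o)) (acc, c)).1 = acc ++ pref os c := by
  induction os generalizing acc c with
  | nil => simp [pref]
  | cons o os ih =>
    simp only [List.foldl_cons, pref]
    rw [ih]
    simp

theorem main_lemma (bits : List Int) (c : Int) :
    (bits.zip (pref (bits.map (fun b => if b ≠ 0 then (1 : Int) else 0)) c)).flatMap
      (fun p => if p.1 = 0 then [0, 1] else [if p.2 % 2 = 1 then (1 : Int) else -1, 1])
    = gA bits (if c % 2 = 0 then -1 else 1) := by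
  induction bits generalizing c with
  | nil => simp [gA]
  | cons b bs ih =>
    simp only [List.map_cons, pref, List.zip_cons_cons, List.flatMap_cons]
    by_cases h : b = 0
    · have h' : ¬ b ≠ 0 := by simp [h]
      rw [if_neg h', add_zero, if_pos h]
      simp only [gA, if_pos h]
      rw [ih c]
      rfl
    · rw [if_pos h, if_neg h]
      simp only [gA, if_neg h]
      rw [ih (c + 1)]
      have h2 : c % 2 = 0 ∨ c % 2 = 1 := Int.emod_two_eq_zero_or_one c
      rcases h2 with h2 | h2
      · rw [if_pos h2, if_pos (by omega : (c + 1) % 2 = 1),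
            if_neg (by omega : ¬ (c + 1) % 2 = 0)]
        rfl
      · rw [if_neg (by omega : ¬ c % 2 = 0), if_neg (by omega : ¬ (c + 1) % 2 = 1),
            if_pos (by omega : (c + 1) % 2 = 0)]
        rfl

-- ===== VERDICT =====
theorem cmi_encode_spec : Claim_equal_cmi_encode := by
  intro bits _
  unfold Spec_cmi_encode cmi_encode cmi_encode_alt
  simp only [foldA_eq, foldPref_eq, List.nil_append]
  rw [main_lemma bits 0]
  norm_num
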